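-- pv_equiv track=rewrite | github.com/LeeSureman/machine_learning__by_numpy | decision_tree/CART.py | divide_by_a_name_and_value
-- ===== SOURCE A (Python) =====
-- def divide_by_a_name_and_value(data,a_index,a_value):
--     value2examples = dict()
--
--     for i, example in enumerate(data):
--         if value2examples.get(example[a_index]==a_value) is None:
--             value2examples[example[a_index]==a_value] = [example]
--         else:
--             value2examples[example[a_index]==a_value].append(example)
--
--     return value2examples
-- ===== SOURCE B (Python) =====
-- def divide_by_a_name_and_value(data, a_index, a_value):
--     keys = dict.fromkeys(e[a_index] == a_value for e in data)
--     return {k: [e for e in data if (e[a_index] == a_value) == k] for k in keys}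
-- ===== Notes on version B (the rewrite author's own statement) =====
-- stated objective: idiomatic
-- what changed: Replaces the single dict-mutating grouping loop by computing the distinct keys in first-occurrence order (dict.fromkeys) and building each group with one filtering pass per key in a dict comprehension.
import Mathlib
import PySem

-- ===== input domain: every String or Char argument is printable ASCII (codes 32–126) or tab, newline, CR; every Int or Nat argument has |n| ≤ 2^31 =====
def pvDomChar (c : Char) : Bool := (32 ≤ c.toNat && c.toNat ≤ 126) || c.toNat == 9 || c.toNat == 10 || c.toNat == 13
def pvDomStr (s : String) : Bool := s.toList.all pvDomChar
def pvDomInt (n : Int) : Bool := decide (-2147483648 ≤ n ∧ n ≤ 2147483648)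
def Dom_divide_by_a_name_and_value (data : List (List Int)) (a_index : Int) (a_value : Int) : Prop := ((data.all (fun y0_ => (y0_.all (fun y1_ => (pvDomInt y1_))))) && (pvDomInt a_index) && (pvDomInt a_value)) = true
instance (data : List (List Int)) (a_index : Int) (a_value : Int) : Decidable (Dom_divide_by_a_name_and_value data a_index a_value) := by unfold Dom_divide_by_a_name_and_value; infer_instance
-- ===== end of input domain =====

-- B computes the distinct keys in first-occurrence order and builds each group with one
-- filtering pass per key (objective: idiomatic). Equivalence proved on Pre_ (every row long
-- enough for a_index, exactly where Python A returns instead of raising IndexError).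


-- key of a row: ex[a_index] == a_value (index valid under Pre_; getD 0 totalizes outside)
def pvKey (a_index a_value : Int) (e : List Int) : Bool :=
  decide ((PySem.List.pyGet? e a_index).getD 0 = a_value)

-- ===== PORT A =====
def divide_by_a_name_and_value (data : List (List Int)) (a_index : Int) (a_value : Int) : List (Bool × List (List Int)) :=
  (data.foldl (fun (d : PySem.Dict Bool (List (List Int))) ex =>
    let k := pvKey a_index a_value ex
    match d.get? k with
    | none => d.insert k [ex]
    | some l => d.insert k (l ++ [ex])) PySem.Dict.empty).items

-- ===== PORT B =====
def divide_by_a_name_and_value_alt (data : List (List Int)) (a_index : Int) (a_value : Int) : List (Bool × List (List Int)) :=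
  let keys := PySem.List.dedup (data.map (fun e => pvKey a_index a_value e))
  keys.map (fun k => (k, data.filter (fun e => pvKey a_index a_value e == k)))

-- ===== PRECONDITION & SPEC =====
-- Pre_: every row admits index a_index under Python indexing; otherwise A raises IndexError.
def Pre_divide_by_a_name_and_value (data : List (List Int)) (a_index : Int) (a_value : Int) : Prop :=
  ∀ row ∈ data, -(row.length : Int) ≤ a_index ∧ a_index < (row.length : Int)
instance (data : List (List Int)) (a_index : Int) (a_value : Int) : Decidable (Pre_divide_by_a_name_and_value data a_index a_value) := by unfold Pre_divide_by_a_name_and_value; infer_instance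
def pvWitness_divide_by_a_name_and_value : List (List Int) × Int × Int := ([[1], [2], [1]], 0, 1)

def Spec_divide_by_a_name_and_value (data : List (List Int)) (a_index : Int) (a_value : Int) (out : List (Bool × List (List Int))) : Prop := out = divide_by_a_name_and_value_alt data a_index a_value
instance (data : List (List Int)) (a_index : Int) (a_value : Int) (out : List (Bool × List (List Int))) : Decidable (Spec_divide_by_a_name_and_value data a_index a_value out) := by unfold Spec_divide_by_a_name_and_value; infer_instance

-- ===== CLAIM (what is proved, stated in full; the proofs are below) =====
def Claim_equal_divide_by_a_name_and_value : Prop := ∀ (data : List (List Int)) (a_index : Int) (a_value : Int), Dom_divide_by_a_name_and_value data a_index a_value → Pre_divide_by_a_name_and_value data a_index a_value → Spec_divide_by_a_name_and_value data a_index a_value (divide_by_a_name_and_value data a_index a_value)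

-- ===== LEMMAS AND PROOFS =====

-- the loop body of port A
def pvStep (a_index a_value : Int) (d : PySem.Dict Bool (List (List Int))) (ex : List Int) : PySem.Dict Bool (List (List Int)) :=
  let k := pvKey a_index a_value ex
  match d.get? k with
  | none => d.insert k [ex]
  | some l => d.insert k (l ++ [ex])

-- rows of data whose key is b
def pvSel (a_index a_value : Int) (b : Bool) (data : List (List Int)) : List (List Int) :=
  data.filter (fun e => pvKey a_index a_value e == b)

lemma pvFold_two (a_index a_value : Int) (b : Bool) (l m : List (List Int)) (data : List (List Int)) :
    data.foldl (pvStep a_index a_value) (PySem.Dict.mk [(b, l), (!b, m)]) =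
      PySem.Dict.mk [(b, l ++ pvSel a_index a_value b data), (!b, m ++ pvSel a_index a_value (!b) data)] := by
  induction data generalizing l m with
  | nil => simp [pvSel]
  | cons e rest ih =>
    by_cases hk : pvKey a_index a_value e = b
    · have hnb : pvKey a_index a_value e ≠ !b := by cases b <;> simp_all
      simp only [List.foldl_cons]
      have : pvStep a_index a_value (PySem.Dict.mk [(b, l), (!b, m)]) e =
          PySem.Dict.mk [(b, l ++ [e]), (!b, m)] := by
        simp [pvStep, hk, PySem.Dict.get?, PySem.Dict.insert]
      rw [this, ih]
      simp [pvSel, hk, hnb, List.filter_cons]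
    · have hb : pvKey a_index a_value e = !b := by cases b <;> simp_all
      simp only [List.foldl_cons]
      have : pvStep a_index a_value (PySem.Dict.mk [(b, l), (!b, m)]) e =
          PySem.Dict.mk [(b, l), (!b, m ++ [e])] := by
        simp [pvStep, hb, PySem.Dict.get?, PySem.Dict.insert]
      rw [this, ih]
      simp [pvSel, hb, hk, List.filter_cons]

lemma pvFold_one (a_index a_value : Int) (b : Bool) (l : List (List Int)) (data : List (List Int)) :
    data.foldl (pvStep a_index a_value) (PySem.Dict.mk [(b, l)]) =
      if pvSel a_index a_value (!b) data = [] then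
        PySem.Dict.mk [(b, l ++ pvSel a_index a_value b data)]
      else
        PySem.Dict.mk [(b, l ++ pvSel a_index a_value b data), (!b, pvSel a_index a_value (!b) data)] := by
  induction data generalizing l with
  | nil => simp [pvSel]
  | cons e rest ih =>
    by_cases hk : pvKey a_index a_value e = b
    · have hnb : pvKey a_index a_value e ≠ !b := by cases b <;> simp_all
      simp only [List.foldl_cons]
      have : pvStep a_index a_value (PySem.Dict.mk [(b, l)]) e =
          PySem.Dict.mk [(b, l ++ [e])] := by
        simp [pvStep, hk, PySem.Dict.get?, PySem.Dict.insert]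
      rw [this, ih]
      simp [pvSel, hk, hnb, List.filter_cons]
    · have hb : pvKey a_index a_value e = !b := by cases b <;> simp_all
      simp only [List.foldl_cons]
      have : pvStep a_index a_value (PySem.Dict.mk [(b, l)]) e =
          PySem.Dict.mk [(b, l), (!b, [e])] := by
        simp [pvStep, hb, PySem.Dict.get?, PySem.Dict.insert]
      rw [this, pvFold_two]
      have hne : pvSel a_index a_value (!b) (e :: rest) ≠ [] := by
        simp [pvSel, List.filter_cons, hb]
      simp only [hne, if_neg hne]
      simp [pvSel, List.filter_cons, hb, hk]

-- a set already containing both booleans absorbs everything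
lemma pvAdd_full (b : Bool) (l : List Bool) :
    l.foldl PySem.Set.add [b, !b] = [b, !b] := by
  induction l with
  | nil => rfl
  | cons a l ih =>
    have : PySem.Set.add [b, !b] a = [b, !b] := by
      cases a <;> cases b <;> simp [PySem.Set.add, PySem.Set.contains]
    simp [this, ih]

lemma pvAdd_single (kb : Bool) (l : List Bool) :
    l.foldl PySem.Set.add [kb] = kb :: (if (!kb) ∈ l then [!kb] else []) := by
  induction l with
  | nil => simp
  | cons a l ih =>
    by_cases h : a = kb
    · have h1 : PySem.Set.add [kb] a = [kb] := by
        cases kb <;> simp_all [PySem.Set.add, PySem.Set.contains]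
      have h2 : ((!kb) ∈ a :: l) ↔ ((!kb) ∈ l) := by
        cases kb <;> simp_all
      by_cases hm : (!kb) ∈ l <;>
        simp only [List.foldl_cons, h1, ih] <;> simp [hm, h2]
    · have ha : a = !kb := by cases a <;> cases kb <;> simp_all
      have h1 : PySem.Set.add [kb] a = [kb, !kb] := by
        cases kb <;> simp_all [PySem.Set.add, PySem.Set.contains]
      simp only [List.foldl_cons, h1, pvAdd_full]
      simp [ha]

-- dict.fromkeys on a nonempty boolean iterable: head key first, the other key iff it occurs
lemma pvDedup_bool_cons (kb : Bool) (l : List Bool) :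
    PySem.List.dedup (kb :: l) = kb :: (if (!kb) ∈ l then [!kb] else []) := by
  rw [PySem.List.dedup_eq_ofList, PySem.Set.ofList_eq_foldl]
  show (kb :: l).foldl PySem.Set.add [] = _
  simp only [List.foldl_cons]
  rw [show PySem.Set.add [] kb = [kb] from rfl]
  exact pvAdd_single kb l

lemma pvMem_map_iff (a_index a_value : Int) (b : Bool) (rest : List (List Int)) :
    (b ∈ rest.map (fun e => pvKey a_index a_value e)) ↔ pvSel a_index a_value b rest ≠ [] := by
  simp only [pvSel, ne_eq, List.filter_eq_nil_iff, List.mem_map]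
  constructor
  · rintro ⟨e, he, hk⟩ h; exact h e he (by simp [hk])
  · intro h
    push_neg at h
    obtain ⟨e, he, hk⟩ := h
    exact ⟨e, he, by simpa using hk⟩

-- ===== VERDICT (by name: the statement is the Claim_ definition above) =====
theorem divide_by_a_name_and_value_spec : Claim_equal_divide_by_a_name_and_value := by
  intro data a_index a_value _ _
  unfold Spec_divide_by_a_name_and_value divide_by_a_name_and_value divide_by_a_name_and_value_alt
  cases data with
  | nil => rfl
  | cons first rest =>
    have hstep : (first :: rest).foldl (pvStep a_index a_value) PySem.Dict.empty =
        rest.foldl (pvStep a_index a_value)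
          (PySem.Dict.mk [(pvKey a_index a_value first, [first])]) := by
      simp only [List.foldl_cons]
      congr 1
    show ((first :: rest).foldl (pvStep a_index a_value) PySem.Dict.empty).items = _
    rw [hstep, pvFold_one, List.map_cons, pvDedup_bool_cons]
    cases hb : pvKey a_index a_value first with
    | true =>
      have hcons : pvSel a_index a_value true (first :: rest) = first :: pvSel a_index a_value true rest := by
        simp [pvSel, List.filter_cons, hb]
      have hcons' : pvSel a_index a_value false (first :: rest) = pvSel a_index a_value false rest := by
        simp [pvSel, List.filter_cons, hb]
      by_cases h2 : pvSel a_index a_value false rest = []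
      · have hm : ¬ ((false : Bool) ∈ rest.map (fun e => pvKey a_index a_value e)) := by
          rw [pvMem_map_iff]; simpa using h2
        simp only [Bool.not_true, if_pos h2, if_neg hm, PySem.Dict.items, List.map_cons, List.map_nil]
        simp [pvSel] at hcons
        simp [pvSel, hcons]
      · have hm : (false : Bool) ∈ rest.map (fun e => pvKey a_index a_value e) := by
          rw [pvMem_map_iff]; exact h2
        simp only [Bool.not_true, if_neg h2, if_pos hm, PySem.Dict.items, List.map_cons, List.map_nil]
        simp [pvSel] at hcons hcons'
        simp [pvSel, hcons, hcons']
    | false =>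
      have hcons : pvSel a_index a_value false (first :: rest) = first :: pvSel a_index a_value false rest := by
        simp [pvSel, List.filter_cons, hb]
      have hcons' : pvSel a_index a_value true (first :: rest) = pvSel a_index a_value true rest := by
        simp [pvSel, List.filter_cons, hb]
      by_cases h2 : pvSel a_index a_value true rest = []
      · have hm : ¬ ((true : Bool) ∈ rest.map (fun e => pvKey a_index a_value e)) := by
          rw [pvMem_map_iff]; simpa using h2
        simp only [Bool.not_false, if_pos h2, if_neg hm, PySem.Dict.items, List.map_cons, List.map_nil]
        simp [pvSel] at hcons
        simp [pvSel, hcons]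
      · have hm : (true : Bool) ∈ rest.map (fun e => pvKey a_index a_value e) := by
          rw [pvMem_map_iff]; exact h2
        simp only [Bool.not_false, if_neg h2, if_pos hm, PySem.Dict.items, List.map_cons, List.map_nil]
        simp [pvSel] at hcons hcons'
        simp [pvSel, hcons, hcons']
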